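-- pv_equiv track=rewrite | github.com/andrei91ro/lulu_pcol_sim | sim.py | processObjectListWildcards
-- ===== SOURCE A (Python) =====
-- def processObjectListWildcards(objectList, suffixList, myId):
--     """Replaces all * wildcards with n copies that each have appended one element from the provided suffixList and replaces %id wildcards with myId
--     ex: objectList = [a, b, c_3, d_*, e_%id], suffixList=['0', '1', '2'], myId=5 => objectList = [a, b, c_3, e_5, d_0, d_1, d_2]
--
--     :objectList: list of objects
--     :suffixList: list of strings that are going to be appended to each object that has the * wildcard
--     :myId: string used to replace '%id' wildcard
--     :returns: the new list"""
--
--     # we iterate over a copy of the object list (in order to modify it)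
--     for item in objectList[:]:
--         if ('*' in item):
--             # append the new items
--             for suffix in suffixList:
--                 objectList.append(item.replace("*", suffix))
--
--             # delete the item that contains the wildcards
--             objectList.remove(item)
--
--         if ('%id' in item):
--             # replace the id wildcard with the id parameter
--             objectList.append(item.replace("%id", myId))
--             # delete the item that contains the '%id' wildcard
--             objectList.remove(item)
--
--     return objectList
-- ===== SOURCE B (Python) =====
-- """B: single filtering pass plus an expansion tail; simpler, no in-place mutation (A mutates objectList; return value is what is matched)."""
-- def processObjectListWildcards(objectList, suffixList, myId):
--     """Single pass, no in-place mutation: keep non-wildcard items in order,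
--     collect all wildcard expansions into a tail appended at the end.
--     (Unlike A, does not mutate objectList; equivalence is about the return value.)"""
--     kept = [x for x in objectList if '*' not in x and '%id' not in x]
--     tail = []
--     for x in objectList:
--         if '*' in x:
--             tail.extend(x.replace('*', s) for s in suffixList)
--         elif '%id' in x:
--             tail.append(x.replace('%id', myId))
--     return kept + tail
-- ===== Notes on version B (the rewrite author's own statement) =====
-- stated objective: simpler
-- what changed: Replaces the mutate-while-iterating loop (each step a linear list.remove plus appends on the shared list) by one filtering pass for the kept items plus a separately accumulated expansion tail, with no in-place mutation and no removals.
-- outside the precondition, e.g. on processObjectListWildcards(['a*%id'], ['*'], '7'): A returns ['a*7'], B returns ['a*%id']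
import Mathlib
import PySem

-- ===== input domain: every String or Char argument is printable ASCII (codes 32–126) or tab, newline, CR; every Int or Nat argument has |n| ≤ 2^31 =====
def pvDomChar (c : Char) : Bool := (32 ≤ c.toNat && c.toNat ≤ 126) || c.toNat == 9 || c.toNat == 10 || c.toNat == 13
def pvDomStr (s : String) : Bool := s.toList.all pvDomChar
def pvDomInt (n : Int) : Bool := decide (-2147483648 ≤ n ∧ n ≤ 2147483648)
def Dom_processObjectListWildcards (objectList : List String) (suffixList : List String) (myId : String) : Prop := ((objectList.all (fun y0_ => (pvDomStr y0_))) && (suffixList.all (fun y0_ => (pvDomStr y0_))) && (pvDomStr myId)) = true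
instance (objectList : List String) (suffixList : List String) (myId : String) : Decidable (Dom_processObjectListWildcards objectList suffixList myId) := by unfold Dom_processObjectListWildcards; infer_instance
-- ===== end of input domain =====

-- B replaces A's mutate-while-iterating loop (a linear list.remove per wildcard) with one
-- filtering pass plus a separately built expansion tail (simpler, no mutation); note A
-- mutates objectList in place — the equivalence proved here is about the RETURN value only.

-- ===== PORT A =====
-- one iteration of A's `for item in objectList[:]` loop; state = the mutated list,
-- none = a raised ValueError from list.remove
def pvStepA (suffixList : List String) (myId : String) (st : Option (List String)) (item : String) : Option (List String) :=
  match st with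
  | none => none
  | some lst =>
    let st1 : Option (List String) :=
      if PySem.Str.isIn "*" item then
        -- append the suffix copies, then `objectList.remove(item)`
        PySem.List.remove? (lst ++ suffixList.map (fun suffix => PySem.Str.replace item "*" suffix)) item
      else some lst
    match st1 with
    | none => none
    | some lst2 =>
      if PySem.Str.isIn "%id" item then
        PySem.List.remove? (lst2 ++ [PySem.Str.replace item "%id" myId]) item
      else some lst2

def processObjectListWildcards (objectList : List String) (suffixList : List String) (myId : String) : List String :=
  -- `objectList[:]` is a copy of the initial list, so the loop runs over the original elements
  (objectList.foldl (pvStepA suffixList myId) (some objectList)).getD []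

-- ===== PORT B =====
def processObjectListWildcards_alt (objectList : List String) (suffixList : List String) (myId : String) : List String :=
  let kept := objectList.filter (fun x => !(PySem.Str.isIn "*" x) && !(PySem.Str.isIn "%id" x))
  let tail := objectList.foldl (fun t x =>
      if PySem.Str.isIn "*" x then t ++ suffixList.map (fun s => PySem.Str.replace x "*" s)
      else if PySem.Str.isIn "%id" x then t ++ [PySem.Str.replace x "%id" myId]
      else t) []
  kept ++ tail

-- ===== PRECONDITION & SPEC =====
-- Pre_ excludes lists with an element containing both '*' and '%id': there A's double
-- removal usually raises ValueError, and returns only by accident for degenerate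
-- suffixes (e.g. a literal '*' suffix), a corner nobody would specify.
def Pre_processObjectListWildcards (objectList : List String) (suffixList : List String) (myId : String) : Prop :=
  ∀ x ∈ objectList, ¬(PySem.Str.isIn "*" x = true ∧ PySem.Str.isIn "%id" x = true)
instance (objectList : List String) (suffixList : List String) (myId : String) : Decidable (Pre_processObjectListWildcards objectList suffixList myId) := by unfold Pre_processObjectListWildcards; infer_instance

def pvWitness_processObjectListWildcards : List String × List String × String :=
  (["a", "b_*", "c_%id"], ["0", "1"], "5")

def Spec_processObjectListWildcards (objectList : List String) (suffixList : List String) (myId : String) (out : List String) : Prop := out = processObjectListWildcards_alt objectList suffixList myId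
instance (objectList : List String) (suffixList : List String) (myId : String) (out : List String) : Decidable (Spec_processObjectListWildcards objectList suffixList myId out) := by unfold Spec_processObjectListWildcards; infer_instance

-- ===== CLAIM (what is proved, stated in full; the proofs are below) =====
def Claim_equal_processObjectListWildcards : Prop := ∀ (objectList : List String) (suffixList : List String) (myId : String), Dom_processObjectListWildcards objectList suffixList myId → Pre_processObjectListWildcards objectList suffixList myId → Spec_processObjectListWildcards objectList suffixList myId (processObjectListWildcards objectList suffixList myId)

-- ===== LEMMAS AND PROOFS =====

-- the expansions one item contributes to the tail
def pvExpOf (suffixList : List String) (myId : String) (x : String) : List String :=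
  if PySem.Str.isIn "*" x then suffixList.map (fun s => PySem.Str.replace x "*" s)
  else if PySem.Str.isIn "%id" x then [PySem.Str.replace x "%id" myId]
  else []

-- B's tail loop is the flatMap of pvExpOf
theorem pvTailB (suffixList : List String) (myId : String) :
    ∀ (r t : List String),
      r.foldl (fun t x =>
        if PySem.Str.isIn "*" x then t ++ suffixList.map (fun s => PySem.Str.replace x "*" s)
        else if PySem.Str.isIn "%id" x then t ++ [PySem.Str.replace x "%id" myId]
        else t) t = t ++ r.flatMap (pvExpOf suffixList myId) := by
  intro r
  induction r with
  | nil => intro t; simp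
  | cons x r' ih =>
    intro t
    simp only [List.foldl_cons, List.flatMap_cons, pvExpOf]
    by_cases h1 : PySem.Str.isIn "*" x = true
    · rw [if_pos h1, if_pos h1, ih, List.append_assoc]
    · rw [if_neg h1, if_neg h1]
      by_cases h2 : PySem.Str.isIn "%id" x = true
      · rw [if_pos h2, if_pos h2, ih, List.append_assoc]
      · rw [if_neg h2, if_neg h2, ih]
        simp

-- list.remove skips a prefix that contains no match
theorem pvRemoveSkip (v : String) :
    ∀ (ks rest : List String), (∀ y ∈ ks, y ≠ v) →
      PySem.List.remove? (ks ++ v :: rest) v = some (ks ++ rest) := by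
  intro ks
  induction ks with
  | nil => intro rest _; simp
  | cons k ks' ih =>
    intro rest h
    have hk : k ≠ v := h k (by simp)
    simp only [List.cons_append, PySem.List.remove?_cons_of_ne _ hk,
      ih rest (fun y hy => h y (by simp [hy]))]
    simp

-- main invariant of A's loop
theorem pvLoopA (suffixList : List String) (myId : String) :
    ∀ (r ks tl : List String),
      (∀ y ∈ ks, PySem.Str.isIn "*" y = false ∧ PySem.Str.isIn "%id" y = false) →
      (∀ x ∈ r, ¬(PySem.Str.isIn "*" x = true ∧ PySem.Str.isIn "%id" x = true)) →
      r.foldl (pvStepA suffixList myId) (some (ks ++ r ++ tl)) =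
        some ((ks ++ r.filter (fun x => !(PySem.Str.isIn "*" x) && !(PySem.Str.isIn "%id" x)))
              ++ (tl ++ r.flatMap (pvExpOf suffixList myId))) := by
  intro r
  induction r with
  | nil => intro ks tl _ _; simp
  | cons x r' ih =>
    intro ks tl hks hr
    have hx := hr x (by simp)
    simp only [List.foldl_cons]
    by_cases h1 : PySem.Str.isIn "*" x = true
    · have h2 : PySem.Str.isIn "%id" x = false := by
        by_cases h : PySem.Str.isIn "%id" x = true
        · exact absurd ⟨h1, h⟩ hx
        · simpa using h
      have h1c : PySem.Chars.isIn ['*'] x.toList = true := by simpa using h1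
      have h2c : PySem.Chars.isIn ['%', 'i', 'd'] x.toList = false := by simpa using h2
      have hne : ∀ y ∈ ks, y ≠ x := by
        intro y hy he
        have hc := (hks y hy).1
        rw [he, h1] at hc
        exact absurd hc (by decide)
      have hstep : pvStepA suffixList myId (some (ks ++ (x :: r') ++ tl)) x =
          some (ks ++ r' ++ (tl ++ suffixList.map (fun s => PySem.Str.replace x "*" s))) := by
        simp only [pvStepA, if_pos h1, if_neg (by simpa using h2 : ¬PySem.Str.isIn "%id" x = true)]
        rw [show (ks ++ (x :: r') ++ tl) ++ suffixList.map (fun s => PySem.Str.replace x "*" s)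
            = ks ++ x :: (r' ++ (tl ++ suffixList.map (fun s => PySem.Str.replace x "*" s))) by simp,
          pvRemoveSkip x ks _ hne]
        simp [List.append_assoc]
      rw [hstep, ih ks _ hks (fun y hy => hr y (by simp [hy]))]
      simp [pvExpOf, h1c, h2c, List.append_assoc]
    · have h1c : PySem.Chars.isIn ['*'] x.toList = false := by simpa using h1
      by_cases h2 : PySem.Str.isIn "%id" x = true
      · have h2c : PySem.Chars.isIn ['%', 'i', 'd'] x.toList = true := by simpa using h2
        have hne : ∀ y ∈ ks, y ≠ x := by
          intro y hy he
          have hc := (hks y hy).2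
          rw [he, h2] at hc
          exact absurd hc (by decide)
        have hstep : pvStepA suffixList myId (some (ks ++ (x :: r') ++ tl)) x =
            some (ks ++ r' ++ (tl ++ [PySem.Str.replace x "%id" myId])) := by
          simp only [pvStepA, if_neg h1, if_pos h2]
          rw [show (ks ++ (x :: r') ++ tl) ++ [PySem.Str.replace x "%id" myId]
              = ks ++ x :: (r' ++ (tl ++ [PySem.Str.replace x "%id" myId])) by simp,
            pvRemoveSkip x ks _ hne]
          simp [List.append_assoc]
        rw [hstep, ih ks _ hks (fun y hy => hr y (by simp [hy]))]
        simp [pvExpOf, h1c, h2c, List.append_assoc]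
      · have h2c : PySem.Chars.isIn ['%', 'i', 'd'] x.toList = false := by simpa using h2
        have hstep : pvStepA suffixList myId (some (ks ++ (x :: r') ++ tl)) x =
            some ((ks ++ [x]) ++ r' ++ tl) := by
          simp only [pvStepA, if_neg h1, if_neg h2]
          simp
        rw [hstep, ih (ks ++ [x]) tl
          (by intro y hy
              rcases List.mem_append.1 hy with h | h
              · exact hks y h
              · simp at h
                subst h
                constructor
                · simpa using h1
                · simpa using h2)
          (fun y hy => hr y (by simp [hy]))]
        simp [pvExpOf, h1c, h2c, List.append_assoc]

-- ===== VERDICT (by name: the statement is the Claim_ definition above) =====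
theorem processObjectListWildcards_spec : Claim_equal_processObjectListWildcards := by
  intro objectList suffixList myId _ hpre
  unfold Spec_processObjectListWildcards
  unfold processObjectListWildcards processObjectListWildcards_alt
  rw [show (some objectList) = some (([] : List String) ++ objectList ++ ([] : List String)) by simp,
    pvLoopA suffixList myId objectList [] [] (by simp) hpre,
    pvTailB suffixList myId objectList []]
  simp
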